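-- pv_equiv track=rewrite | github.com/thomasvincent/gps-genealogy-agents | src/gps_agents/gramps/merge.py | _is_name_variant
-- ===== SOURCE A (Python) =====
-- def _is_name_variant(name1: str, name2: str) -> bool:
--     """Check if names are common variants of each other."""
--     variants = {
--         "william": ["bill", "will", "willy", "billy", "liam"],
--         "elizabeth": ["beth", "liz", "lizzy", "betty", "eliza", "bessie"],
--         "robert": ["bob", "rob", "robbie", "bobby", "bert"],
--         "james": ["jim", "jimmy", "jamie"],
--         "john": ["jack", "johnny", "jon"],
--         "margaret": ["peggy", "maggie", "meg", "marge", "margie"],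
--         "catherine": ["kate", "katie", "cathy", "kitty", "kathy"],
--         "thomas": ["tom", "tommy", "thom"],
--         "richard": ["rick", "dick", "rich", "ricky"],
--         "joseph": ["joe", "joey", "jo"],
--         "mary": ["marie", "maria", "molly", "polly"],
--         "anne": ["ann", "anna", "annie", "nan", "nancy"],
--         "jean": ["jan", "jane", "jeanne", "joan"],
--     }
--
--     n1 = name1.lower()
--     n2 = name2.lower()
--
--     for base, var_list in variants.items():
--         all_names = [base, *var_list]
--         if n1 in all_names and n2 in all_names:
--             return True
--
--     return False
-- ===== SOURCE B (Python) =====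
-- # Flat name -> group index, written out once as a module-level constant.
-- # Every base name and every variant maps to its group's base name; all names
-- # are distinct, so the index is well-defined.
-- _NAME_TO_GROUP = {
--     "william": "william",
--     "bill": "william",
--     "will": "william",
--     "willy": "william",
--     "billy": "william",
--     "liam": "william",
--     "elizabeth": "elizabeth",
--     "beth": "elizabeth",
--     "liz": "elizabeth",
--     "lizzy": "elizabeth",
--     "betty": "elizabeth",
--     "eliza": "elizabeth",
--     "bessie": "elizabeth",
--     "robert": "robert",
--     "bob": "robert",
--     "rob": "robert",
--     "robbie": "robert",
--     "bobby": "robert",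
--     "bert": "robert",
--     "james": "james",
--     "jim": "james",
--     "jimmy": "james",
--     "jamie": "james",
--     "john": "john",
--     "jack": "john",
--     "johnny": "john",
--     "jon": "john",
--     "margaret": "margaret",
--     "peggy": "margaret",
--     "maggie": "margaret",
--     "meg": "margaret",
--     "marge": "margaret",
--     "margie": "margaret",
--     "catherine": "catherine",
--     "kate": "catherine",
--     "katie": "catherine",
--     "cathy": "catherine",
--     "kitty": "catherine",
--     "kathy": "catherine",
--     "thomas": "thomas",
--     "tom": "thomas",
--     "tommy": "thomas",
--     "thom": "thomas",
--     "richard": "richard",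
--     "rick": "richard",
--     "dick": "richard",
--     "rich": "richard",
--     "ricky": "richard",
--     "joseph": "joseph",
--     "joe": "joseph",
--     "joey": "joseph",
--     "jo": "joseph",
--     "mary": "mary",
--     "marie": "mary",
--     "maria": "mary",
--     "molly": "mary",
--     "polly": "mary",
--     "anne": "anne",
--     "ann": "anne",
--     "anna": "anne",
--     "annie": "anne",
--     "nan": "anne",
--     "nancy": "anne",
--     "jean": "jean",
--     "jan": "jean",
--     "jane": "jean",
--     "jeanne": "jean",
--     "joan": "jean",
-- }
--
--
-- def _is_name_variant(name1: str, name2: str) -> bool: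
--     """Check if names are common variants of each other."""
--     g1 = _NAME_TO_GROUP.get(name1.lower())
--     return g1 is not None and g1 == _NAME_TO_GROUP.get(name2.lower())
-- ===== Notes on version B (the rewrite author's own statement) =====
-- stated objective: idiomatic
-- what changed: Replaces the per-call scan over all 13 groups with list-membership tests by a flat name-to-group dictionary written out once as a module constant; the call is two O(1) lookups and an equality comparison.
import Mathlib
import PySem

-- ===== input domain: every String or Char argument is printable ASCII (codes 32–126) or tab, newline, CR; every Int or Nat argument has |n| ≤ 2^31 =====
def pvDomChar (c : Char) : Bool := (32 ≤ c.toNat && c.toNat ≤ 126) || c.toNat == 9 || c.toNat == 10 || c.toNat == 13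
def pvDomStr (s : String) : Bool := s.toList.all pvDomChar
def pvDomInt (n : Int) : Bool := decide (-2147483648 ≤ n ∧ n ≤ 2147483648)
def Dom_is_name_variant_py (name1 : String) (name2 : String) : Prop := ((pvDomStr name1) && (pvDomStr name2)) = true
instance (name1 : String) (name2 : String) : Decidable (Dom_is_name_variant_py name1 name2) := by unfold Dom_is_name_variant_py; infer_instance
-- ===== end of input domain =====

-- B replaces A's per-call scan over all groups (with list membership tests) by a flat
-- name→group constant index, so a call is two lookups and an equality test (idiomatic).

-- ===== PORT A =====
-- the for-loop with early return: scan groups, test membership of both names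
def pvLoopA (n1 n2 : String) : List (String × List String) → Bool
  | [] => false
  | (base, var_list) :: rest =>
    let all_names := base :: var_list
    if all_names.contains n1 && all_names.contains n2 then true
    else pvLoopA n1 n2 rest

def is_name_variant_py (name1 : String) (name2 : String) : Bool :=
  -- the local 'variants' dict of A, in insertion order
  let variants : List (String × List String) :=
    [ ("william", ["bill", "will", "willy", "billy", "liam"]),
      ("elizabeth", ["beth", "liz", "lizzy", "betty", "eliza", "bessie"]),
      ("robert", ["bob", "rob", "robbie", "bobby", "bert"]),
      ("james", ["jim", "jimmy", "jamie"]),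
      ("john", ["jack", "johnny", "jon"]),
      ("margaret", ["peggy", "maggie", "meg", "marge", "margie"]),
      ("catherine", ["kate", "katie", "cathy", "kitty", "kathy"]),
      ("thomas", ["tom", "tommy", "thom"]),
      ("richard", ["rick", "dick", "rich", "ricky"]),
      ("joseph", ["joe", "joey", "jo"]),
      ("mary", ["marie", "maria", "molly", "polly"]),
      ("anne", ["ann", "anna", "annie", "nan", "nancy"]),
      ("jean", ["jan", "jane", "jeanne", "joan"]) ]
  pvLoopA (PySem.Str.lower name1) (PySem.Str.lower name2) variants

-- ===== PORT B =====
-- the flat constant index _NAME_TO_GROUP, written out literally as in Source B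
-- (keys are distinct, so the Python dict is this assoc list; .get = first-match lookup)
def pvNameToGroup : List (String × String) :=
  [
    ("william", "william"),
    ("bill", "william"),
    ("will", "william"),
    ("willy", "william"),
    ("billy", "william"),
    ("liam", "william"),
    ("elizabeth", "elizabeth"),
    ("beth", "elizabeth"),
    ("liz", "elizabeth"),
    ("lizzy", "elizabeth"),
    ("betty", "elizabeth"),
    ("eliza", "elizabeth"),
    ("bessie", "elizabeth"),
    ("robert", "robert"),
    ("bob", "robert"),
    ("rob", "robert"),
    ("robbie", "robert"),
    ("bobby", "robert"),
    ("bert", "robert"),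
    ("james", "james"),
    ("jim", "james"),
    ("jimmy", "james"),
    ("jamie", "james"),
    ("john", "john"),
    ("jack", "john"),
    ("johnny", "john"),
    ("jon", "john"),
    ("margaret", "margaret"),
    ("peggy", "margaret"),
    ("maggie", "margaret"),
    ("meg", "margaret"),
    ("marge", "margaret"),
    ("margie", "margaret"),
    ("catherine", "catherine"),
    ("kate", "catherine"),
    ("katie", "catherine"),
    ("cathy", "catherine"),
    ("kitty", "catherine"),
    ("kathy", "catherine"),
    ("thomas", "thomas"),
    ("tom", "thomas"),
    ("tommy", "thomas"),
    ("thom", "thomas"),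
    ("richard", "richard"),
    ("rick", "richard"),
    ("dick", "richard"),
    ("rich", "richard"),
    ("ricky", "richard"),
    ("joseph", "joseph"),
    ("joe", "joseph"),
    ("joey", "joseph"),
    ("jo", "joseph"),
    ("mary", "mary"),
    ("marie", "mary"),
    ("maria", "mary"),
    ("molly", "mary"),
    ("polly", "mary"),
    ("anne", "anne"),
    ("ann", "anne"),
    ("anna", "anne"),
    ("annie", "anne"),
    ("nan", "anne"),
    ("nancy", "anne"),
    ("jean", "jean"),
    ("jan", "jean"),
    ("jane", "jean"),
    ("jeanne", "jean"),
    ("joan", "jean")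
  ]

def is_name_variant_py_alt (name1 : String) (name2 : String) : Bool :=
  match pvNameToGroup.lookup (PySem.Str.lower name1) with
  | none => false
  | some g1 => pvNameToGroup.lookup (PySem.Str.lower name2) == some g1

-- ===== PRECONDITION & SPEC =====
def Spec_is_name_variant_py (name1 : String) (name2 : String) (out : Bool) : Prop := out = is_name_variant_py_alt name1 name2
instance (name1 : String) (name2 : String) (out : Bool) : Decidable (Spec_is_name_variant_py name1 name2 out) := by unfold Spec_is_name_variant_py; infer_instance

-- ===== CLAIM =====
def Claim_equal_is_name_variant_py : Prop := ∀ (name1 : String) (name2 : String), Dom_is_name_variant_py name1 name2 → Spec_is_name_variant_py name1 name2 (is_name_variant_py name1 name2)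

-- ===== LEMMAS AND PROOFS =====

-- proof-side copy of A's local table, to state lemmas about it
def pvVariantsTable : List (String × List String) :=
  [ ("william", ["bill", "will", "willy", "billy", "liam"]),
    ("elizabeth", ["beth", "liz", "lizzy", "betty", "eliza", "bessie"]),
    ("robert", ["bob", "rob", "robbie", "bobby", "bert"]),
    ("james", ["jim", "jimmy", "jamie"]),
    ("john", ["jack", "johnny", "jon"]),
    ("margaret", ["peggy", "maggie", "meg", "marge", "margie"]),
    ("catherine", ["kate", "katie", "cathy", "kitty", "kathy"]),
    ("thomas", ["tom", "tommy", "thom"]),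
    ("richard", ["rick", "dick", "rich", "ricky"]),
    ("joseph", ["joe", "joey", "jo"]),
    ("mary", ["marie", "maria", "molly", "polly"]),
    ("anne", ["ann", "anna", "annie", "nan", "nancy"]),
    ("jean", ["jan", "jane", "jeanne", "joan"]) ]

-- flat index of an arbitrary groups list
def pvFlat (gs : List (String × List String)) : List (String × String) :=
  gs.flatMap fun p => (p.1 :: p.2).map fun n => (n, p.1)

-- two groups share no name (Bool, so the table fact is decidable)
def pvDisj (p q : String × List String) : Bool :=
  (p.1 :: p.2).all fun n => !((q.1 :: q.2).contains n)

theorem pvDisj_not {p q : String × List String} (h : pvDisj p q = true) :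
    ∀ n ∈ p.1 :: p.2, n ∉ q.1 :: q.2 := by
  intro n hn
  simp only [pvDisj, List.all_eq_true] at h
  simpa using h n hn

theorem pvSeg_lookup (base n : String) (names : List String) :
    ((names.map fun m => (m, base)).lookup n) =
      if n ∈ names then some base else none := by
  induction names with
  | nil => simp
  | cons a as ih =>
    by_cases h : n = a
    · subst h
      simp
    · have hb : (n == a) = false := by simp [h]
      simp [List.lookup, hb, ih, h]

theorem pvLookup_append {α : Type} [BEq α] {β : Type} (l1 l2 : List (α × β)) (n : α) :
    (l1 ++ l2).lookup n = ((l1.lookup n).or (l2.lookup n)) := by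
  induction l1 with
  | nil => simp
  | cons a as ih =>
    cases a with
    | mk k v =>
      cases h : (n == k) with
      | true => simp [List.lookup, h]
      | false => simp [List.lookup, h, ih]

theorem pvFlat_cons (g : String × List String) (rest : List (String × List String)) :
    pvFlat (g :: rest) = ((g.1 :: g.2).map fun n => (n, g.1)) ++ pvFlat rest := by
  simp [pvFlat]

theorem pvLookup_flat_some (gs : List (String × List String)) (n b : String)
    (h : (pvFlat gs).lookup n = some b) :
    ∃ p ∈ gs, p.1 = b ∧ n ∈ p.1 :: p.2 := by
  induction gs with
  | nil => simp [pvFlat] at h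
  | cons g rest ih =>
    rw [pvFlat_cons, pvLookup_append, pvSeg_lookup] at h
    by_cases hc : n ∈ g.1 :: g.2
    · rw [if_pos hc, Option.some_or] at h
      exact ⟨g, by simp, Option.some.inj h, hc⟩
    · rw [if_neg hc, Option.none_or] at h
      obtain ⟨p, hp, h1, h2⟩ := ih h
      exact ⟨p, by simp [hp], h1, h2⟩

theorem pvLoopA_false1 (n1 n2 : String) (gs : List (String × List String))
    (h : ∀ p ∈ gs, n1 ∉ p.1 :: p.2) : pvLoopA n1 n2 gs = false := by
  induction gs with
  | nil => rfl
  | cons g rest ih =>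
    have hg := h g (by simp)
    simp only [pvLoopA]
    rw [if_neg (by simp [hg])]
    exact ih fun p hp => h p (by simp [hp])

theorem pvLoopA_false2 (n1 n2 : String) (gs : List (String × List String))
    (h : ∀ p ∈ gs, n2 ∉ p.1 :: p.2) : pvLoopA n1 n2 gs = false := by
  induction gs with
  | nil => rfl
  | cons g rest ih =>
    have hg := h g (by simp)
    simp only [pvLoopA]
    rw [if_neg (by simp [hg])]
    exact ih fun p hp => h p (by simp [hp])

theorem pvMain (n1 n2 : String) (gs : List (String × List String))
    (hd : gs.Pairwise fun p q => pvDisj p q = true) :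
    pvLoopA n1 n2 gs =
      (match (pvFlat gs).lookup n1 with
       | none => false
       | some g1 => (pvFlat gs).lookup n2 == some g1) := by
  induction gs with
  | nil => rfl
  | cons g rest ih =>
    rw [List.pairwise_cons] at hd
    obtain ⟨hdis, htail⟩ := hd
    by_cases h1 : n1 ∈ g.1 :: g.2
    · by_cases h2 : n2 ∈ g.1 :: g.2
      · simp only [pvLoopA]
        rw [if_pos (by simp [h1, h2])]
        rw [pvFlat_cons, pvLookup_append, pvLookup_append, pvSeg_lookup, pvSeg_lookup,
          if_pos h1, if_pos h2, Option.some_or, Option.some_or]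
        simp
      · simp only [pvLoopA]
        rw [if_neg (by simp [h2])]
        have hL : pvLoopA n1 n2 rest = false :=
          pvLoopA_false1 n1 n2 rest fun p hp => pvDisj_not (hdis p hp) n1 h1
        rw [hL, pvFlat_cons, pvLookup_append, pvLookup_append, pvSeg_lookup, pvSeg_lookup,
          if_pos h1, if_neg h2, Option.some_or, Option.none_or]
        cases hr : (pvFlat rest).lookup n2 with
        | none => simp
        | some b =>
          obtain ⟨p, hp, hb, hhas⟩ := pvLookup_flat_some rest n2 b hr
          have hne : b ≠ g.1 := by
            intro he
            have hx : p.1 ∈ g.1 :: g.2 := by rw [hb, he]; simp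
            exact pvDisj_not (hdis p hp) p.1 hx (by simp)
          simp [hne]
    · simp only [pvLoopA]
      rw [if_neg (by simp [h1])]
      rw [pvFlat_cons, pvLookup_append, pvLookup_append, pvSeg_lookup, pvSeg_lookup,
        if_neg h1, Option.none_or]
      by_cases h2 : n2 ∈ g.1 :: g.2
      · rw [if_pos h2, Option.some_or]
        have hL : pvLoopA n1 n2 rest = false :=
          pvLoopA_false2 n1 n2 rest fun p hp => pvDisj_not (hdis p hp) n2 h2
        rw [hL]
        cases hr : (pvFlat rest).lookup n1 with
        | none => simp
        | some b =>
          obtain ⟨p, hp, hb, hhas⟩ := pvLookup_flat_some rest n1 b hr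
          have hne : g.1 ≠ b := by
            intro he
            have hx : p.1 ∈ g.1 :: g.2 := by rw [hb, ← he]; simp
            exact pvDisj_not (hdis p hp) p.1 hx (by simp)
          simp [hne]
      · rw [if_neg h2, Option.none_or]
        exact ih htail

theorem pvVariantsTable_pairwise : pvVariantsTable.Pairwise fun p q => pvDisj p q = true := by
  rw [pvVariantsTable]
  decide

-- B's literal flat index is exactly the flattening of A's table
theorem pvFlat_table : pvFlat pvVariantsTable = pvNameToGroup := by decide

-- ===== VERDICT =====
theorem is_name_variant_py_spec : Claim_equal_is_name_variant_py := by
  intro name1 name2 _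
  unfold Spec_is_name_variant_py is_name_variant_py is_name_variant_py_alt
  have h := pvMain (PySem.Str.lower name1) (PySem.Str.lower name2) pvVariantsTable
    pvVariantsTable_pairwise
  rw [pvFlat_table] at h
  exact h
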